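-- pv_equiv track=rewrite | github.com/Afonsosr/plneb-2425 | TPC1/tpc1.py | ocorrencias1
-- ===== SOURCE A (Python) =====
-- def ocorrencias1(s1,s2):
--     l_s1 = []
--     l_s2 = []
--     cont = {}
--     for l in s1:
--         if l not in l_s1:
--             l_s1.append(l)
--     for l in s2:
--         l_s2.append(l)
--     for l in l_s1:
--         for elem in l_s2:
--             if l == elem:
--                 if elem not in cont:
--                     cont[elem] = 1
--                 else:
--                     cont[elem] += 1
--
--     return cont
-- ===== SOURCE B (Python) =====
-- def ocorrencias1(s1, s2):
--     # One pass over s2 builds a count table; one pass over s1 emits each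
--     # distinct s1 char (in s1 order) that occurs in s2, with its count.
--     counts = {}
--     for c in s2:
--         counts[c] = counts.get(c, 0) + 1
--     cont = {}
--     for c in s1:
--         if c not in cont and c in counts:
--             cont[c] = counts[c]
--     return cont
-- ===== Notes on version B (the rewrite author's own statement) =====
-- stated objective: faster
-- what changed: Replaces the rescan of all of s2 for every distinct s1 character with a single counting pass over s2 plus one pass over s1 that looks each character up in the count table.
import Mathlib
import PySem

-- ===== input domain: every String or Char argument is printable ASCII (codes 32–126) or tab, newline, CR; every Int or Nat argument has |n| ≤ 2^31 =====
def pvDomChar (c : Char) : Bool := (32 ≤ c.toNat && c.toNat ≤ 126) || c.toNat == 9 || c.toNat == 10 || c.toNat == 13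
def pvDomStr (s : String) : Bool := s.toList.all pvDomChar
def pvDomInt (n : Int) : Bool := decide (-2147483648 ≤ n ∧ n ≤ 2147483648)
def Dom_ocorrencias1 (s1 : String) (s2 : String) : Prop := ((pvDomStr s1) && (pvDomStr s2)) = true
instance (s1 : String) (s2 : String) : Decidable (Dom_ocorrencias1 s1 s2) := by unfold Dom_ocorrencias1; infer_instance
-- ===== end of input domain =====

-- B replaces A's rescan of s2 for every distinct s1 character by one counting
-- pass over s2 plus one guarded pass over s1 (objective: faster).

-- ===== PORT A =====
-- Keys of the Python dict are one-character strings; the ports keep the dict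
-- keyed by Char and render each key as its one-character String on return.
def ocorrencias1 (s1 : String) (s2 : String) : List (String × Int) :=
  let l_s1 := s1.toList.foldl (fun acc l => if l ∈ acc then acc else acc ++ [l]) []
  let l_s2 := s2.toList.foldl (fun acc l => acc ++ [l]) ([] : List Char)
  let cont := l_s1.foldl (fun cont l =>
      l_s2.foldl (fun cont elem =>
          if l = elem then
            match cont.get? elem with
            | none => cont.insert elem 1
            | some v => cont.insert elem (v + 1)
          else cont)
        cont)
    (PySem.Dict.empty : PySem.Dict Char Int)
  cont.items.map (fun p => (p.1.toString, p.2))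

-- ===== PORT B =====
def ocorrencias1_alt (s1 : String) (s2 : String) : List (String × Int) :=
  let counts := s2.toList.foldl (fun d c => d.modify c 0 (fun x => x + 1))
    (PySem.Dict.empty : PySem.Dict Char Int)
  let cont := s1.toList.foldl (fun cont c =>
      if cont.contains c then cont
      else
        match counts.get? c with
        | some v => cont.insert c v
        | none => cont)
    (PySem.Dict.empty : PySem.Dict Char Int)
  cont.items.map (fun p => (p.1.toString, p.2))

-- ===== PRECONDITION & SPEC =====
def Spec_ocorrencias1 (s1 : String) (s2 : String) (out : List (String × Int)) : Prop := out = ocorrencias1_alt s1 s2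
instance (s1 : String) (s2 : String) (out : List (String × Int)) : Decidable (Spec_ocorrencias1 s1 s2 out) := by unfold Spec_ocorrencias1; infer_instance

-- ===== CLAIM (what is proved, stated in full; the proofs are below) =====
def Claim_equal_ocorrencias1 : Prop := ∀ (s1 : String) (s2 : String), Dom_ocorrencias1 s1 s2 → Spec_ocorrencias1 s1 s2 (ocorrencias1 s1 s2)

-- ===== LEMMAS AND PROOFS =====

-- canonical value both dicts reach: each char of A (in order) that occurs,
-- paired with its count
def canon (cnt : Char → Nat) (A : List Char) : List (Char × Int) :=
  A.filterMap (fun c => if cnt c = 0 then none else some (c, (cnt c : Int)))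

theorem dict_get?_none_iff {κ ν : Type} [BEq κ] (d : PySem.Dict κ ν) (k : κ) :
    d.get? k = none ↔ d.contains k = false := by
  simp [PySem.Dict.get?, PySem.Dict.contains, List.find?_eq_none, List.any_eq_false]

theorem dict_insert_fresh {κ ν : Type} [BEq κ] (d : PySem.Dict κ ν) (k : κ) (v : ν)
    (h : d.contains k = false) :
    d.insert k v = PySem.Dict.mk (d.items ++ [(k, v)]) := by
  simp [PySem.Dict.insert, h]

theorem dict_insert_insert {κ ν : Type} [BEq κ] [LawfulBEq κ] (d : PySem.Dict κ ν) (k : κ)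
    (v w : ν) : (d.insert k v).insert k w = d.insert k w := by
  have hg : ∀ p : κ × ν,
      (fun p : κ × ν => if p.1 == k then (k, w) else p)
        ((fun p : κ × ν => if p.1 == k then (k, v) else p) p)
      = (fun p : κ × ν => if p.1 == k then (k, w) else p) p := by
    intro p; by_cases hp : p.1 == k <;> simp [hp]
  by_cases h : d.contains k = true
  · have hv : d.insert k v
        = PySem.Dict.mk (d.items.map fun p => if p.1 == k then (k, v) else p) := by
      simp [PySem.Dict.insert, h]
    have hw : d.insert k w
        = PySem.Dict.mk (d.items.map fun p => if p.1 == k then (k, w) else p) := by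
      simp [PySem.Dict.insert, h]
    have hc2 : (PySem.Dict.mk (d.items.map fun p => if p.1 == k then (k, v) else p)).contains k
        = true := by
      rcases List.any_eq_true.mp (show d.items.any (fun p => p.1 == k) = true from h) with
        ⟨p, hp, hpk⟩
      exact List.any_eq_true.mpr ⟨_, List.mem_map_of_mem hp, by simp [hpk]⟩
    rw [hv, hw]
    have hstep : (PySem.Dict.mk (d.items.map fun p => if p.1 == k then (k, v) else p)).insert k w
        = PySem.Dict.mk ((d.items.map fun p => if p.1 == k then (k, v) else p).map
            fun p => if p.1 == k then (k, w) else p) := by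
      simp [PySem.Dict.insert, hc2]
    rw [hstep, List.map_map]
    congr 1
    exact List.map_congr_left fun p _ => hg p
  · have h' : d.contains k = false := by simpa using h
    rw [dict_insert_fresh d k w h', dict_insert_fresh d k v h']
    have ha : (PySem.Dict.mk (d.items ++ [(k, v)])).contains k = true := by
      simp [PySem.Dict.contains]
    have hstep : (PySem.Dict.mk (d.items ++ [(k, v)])).insert k w
        = PySem.Dict.mk ((d.items ++ [(k, v)]).map fun p => if p.1 == k then (k, w) else p) := by
      simp [PySem.Dict.insert, ha]
    rw [hstep]
    congr 1
    rw [List.map_append]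
    have h1 : d.items.map (fun p => if p.1 == k then (k, w) else p) = d.items := by
      refine (List.map_congr_left ?_).trans (List.map_id d.items)
      intro p hp
      have hall := List.any_eq_false.mp
        (show d.items.any (fun p => p.1 == k) = false from h')
      have hpf : (p.1 == k) = false := by simpa using hall p hp
      simp [hpf]
    rw [h1]
    simp

theorem nodup_concat : ∀ (A : List Char) (x : Char), A.Nodup → x ∉ A → (A ++ [x]).Nodup := by
  intro A
  induction A with
  | nil => intro x _ _; exact List.nodup_singleton x
  | cons a t ih =>
    intro x hA hx
    rw [List.cons_append, List.nodup_cons]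
    rw [List.nodup_cons] at hA
    refine ⟨?_, ih x hA.2 (fun h => hx (List.mem_cons_of_mem a h))⟩
    intro hmem
    rcases List.mem_append.mp hmem with h | h
    · exact hA.1 h
    · have hax : a = x := by simpa using h
      exact hx (by rw [← hax]; exact List.mem_cons_self ..)

theorem contains_canon (cnt : Char → Nat) (A : List Char) (c : Char) :
    (PySem.Dict.mk (canon cnt A)).contains c = true ↔ c ∈ A ∧ cnt c ≠ 0 := by
  simp only [PySem.Dict.contains, canon, List.any_eq_true, List.mem_filterMap]
  constructor
  · rintro ⟨p, ⟨a, ha, hEq⟩, hbeq⟩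
    by_cases h0 : cnt a = 0
    · simp [h0] at hEq
    · simp only [h0, if_false] at hEq
      cases hEq
      have : a = c := by simpa using hbeq
      subst this
      exact ⟨ha, h0⟩
  · rintro ⟨hmem, h0⟩
    exact ⟨(c, (cnt c : Int)), ⟨c, hmem, by simp [h0]⟩, by simp⟩

theorem get?_counter_eq (xs : List Char) (c : Char) :
    (PySem.Dict.counter xs).get? c
      = if xs.count c = 0 then none else some ((xs.count c : Int)) := by
  by_cases hc : c ∈ xs
  · have h0 : xs.count c ≠ 0 := fun h => (List.count_eq_zero.mp h) hc
    rw [if_neg h0]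
    cases hg : (PySem.Dict.counter xs).get? c with
    | none =>
      exfalso
      have := (dict_get?_none_iff _ c).mp hg
      rw [PySem.Dict.contains_counter] at this
      simp [hc] at this
    | some v =>
      have hgd := PySem.Dict.getD_counter xs c
      rw [PySem.Dict.getD, hg] at hgd
      simp at hgd
      rw [hgd]
  · have h0 : xs.count c = 0 := List.count_eq_zero.mpr hc
    rw [if_pos h0, dict_get?_none_iff, PySem.Dict.contains_counter]
    simpa using hc

theorem innerA (xs : List Char) (l : Char) (d : PySem.Dict Char Int) :
    xs.foldl (fun cont elem =>
        if l = elem then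
          match cont.get? elem with
          | none => cont.insert elem 1
          | some v => cont.insert elem (v + 1)
        else cont) d
    = if xs.count l = 0 then d else d.insert l (d.getD l 0 + (xs.count l : Int)) := by
  induction xs generalizing d with
  | nil => simp
  | cons x t ih =>
    by_cases hx : l = x
    · subst hx
      rw [List.foldl_cons, if_pos rfl]
      have hcnt : (l :: t).count l = t.count l + 1 := by simp
      cases hg : d.get? l with
      | none =>
        have hgd : d.getD l 0 = 0 := by simp [PySem.Dict.getD, hg]
        show List.foldl _ (d.insert l 1) t = _
        rw [ih, hcnt]
        have hins : (d.insert l 1).getD l 0 = 1 := PySem.Dict.getD_insert_self d l 1 0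
        by_cases h0 : t.count l = 0
        · rw [if_pos h0, if_neg (by omega), hgd, h0]
          norm_num
        · rw [if_neg h0, if_neg (by omega), hins, dict_insert_insert, hgd]
          congr 1
          push_cast
          ring
      | some v =>
        have hgd : d.getD l 0 = v := by simp [PySem.Dict.getD, hg]
        show List.foldl _ (d.insert l (v + 1)) t = _
        rw [ih, hcnt]
        have hins : (d.insert l (v + 1)).getD l 0 = v + 1 := PySem.Dict.getD_insert_self d l (v + 1) 0
        by_cases h0 : t.count l = 0
        · rw [if_pos h0, if_neg (by omega), hgd, h0]
          norm_num
        · rw [if_neg h0, if_neg (by omega), hins, dict_insert_insert, hgd]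
          congr 1
          push_cast
          ring
    · rw [List.foldl_cons, if_neg hx]
      have hcnt : (x :: t).count l = t.count l := by
        have : (x == l) = false := by simpa using (Ne.symm hx)
        simp [List.count_cons, this]
      rw [ih, hcnt]

theorem outerA (xs2 : List Char) (L : List Char) :
    ∀ (d : PySem.Dict Char Int), L.Nodup → (∀ c ∈ L, d.get? c = none) →
    L.foldl (fun cont l =>
        xs2.foldl (fun cont elem =>
            if l = elem then
              match cont.get? elem with
              | none => cont.insert elem 1
              | some v => cont.insert elem (v + 1)
            else cont)
          cont) d
    = PySem.Dict.mk (d.items ++ canon (fun c => xs2.count c) L) := by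
  induction L with
  | nil => intro d _ _; simp [canon]
  | cons l t ih =>
    intro d hnd hd
    rw [List.foldl_cons, innerA]
    have hgl : d.get? l = none := hd l (List.mem_cons_self ..)
    have hgd : d.getD l 0 = 0 := by simp [PySem.Dict.getD, hgl]
    have hlt : l ∉ t := (List.nodup_cons.mp hnd).1
    have hndt : t.Nodup := (List.nodup_cons.mp hnd).2
    by_cases h0 : xs2.count l = 0
    · rw [if_pos h0, ih d hndt (fun c hc => hd c (List.mem_cons_of_mem _ hc))]
      congr 2
      simp [canon, h0]
    · rw [if_neg h0, hgd]
      have hfresh : d.contains l = false := (dict_get?_none_iff d l).mp hgl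
      have hitems : (d.insert l (0 + (xs2.count l : Int))).items
          = d.items ++ [(l, (xs2.count l : Int))] := by
        rw [dict_insert_fresh d l _ hfresh]
        norm_num
      rw [ih (d.insert l (0 + (xs2.count l : Int))) hndt
        (fun c hc => by
          have hne : c ≠ l := by intro he; subst he; exact hlt hc
          rw [PySem.Dict.get?_insert_of_ne d _ hne]
          exact hd c (List.mem_cons_of_mem _ hc))]
      rw [hitems]
      congr 1
      rw [List.append_assoc]
      congr 1
      simp [canon, h0]

theorem foldB (xs2 : List Char) (l1 : List Char) :
    ∀ (A : List Char), A.Nodup →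
    l1.foldl (fun cont c =>
        if cont.contains c then cont
        else
          match (PySem.Dict.counter xs2).get? c with
          | some v => cont.insert c v
          | none => cont)
      (PySem.Dict.mk (canon (fun c => xs2.count c) A))
    = PySem.Dict.mk (canon (fun c => xs2.count c)
        (l1.foldl (fun acc l => if l ∈ acc then acc else acc ++ [l]) A)) := by
  induction l1 with
  | nil => intro A _; rfl
  | cons c t ih =>
    intro A hA
    rw [List.foldl_cons, List.foldl_cons, get?_counter_eq]
    by_cases hmem : c ∈ A
    · rw [if_pos hmem]
      by_cases h0 : xs2.count c = 0
      · have hcon : (PySem.Dict.mk (canon (fun c => xs2.count c) A)).contains c = false := by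
          rw [← Bool.not_eq_true, contains_canon]
          tauto
        rw [hcon, if_pos h0]
        exact ih A hA
      · have hcon : (PySem.Dict.mk (canon (fun c => xs2.count c) A)).contains c = true :=
          (contains_canon _ A c).mpr ⟨hmem, h0⟩
        rw [hcon]
        simp only [if_true]
        exact ih A hA
    · rw [if_neg hmem]
      have hcon : (PySem.Dict.mk (canon (fun c => xs2.count c) A)).contains c = false := by
        rw [← Bool.not_eq_true, contains_canon]
        tauto
      rw [hcon]
      have hAnd : (A ++ [c]).Nodup := nodup_concat _ _ hA hmem
      by_cases h0 : xs2.count c = 0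
      · rw [if_pos h0]
        have hcan : canon (fun c => xs2.count c) (A ++ [c]) = canon (fun c => xs2.count c) A := by
          simp [canon, List.filterMap_append, h0]
        have := ih (A ++ [c]) hAnd
        rw [hcan] at this
        simpa using this
      · rw [if_neg h0]
        have hins : (PySem.Dict.mk (canon (fun c => xs2.count c) A)).insert c (xs2.count c : Int)
            = PySem.Dict.mk (canon (fun c => xs2.count c) (A ++ [c])) := by
          rw [dict_insert_fresh _ c _ hcon]
          congr 1
          simp [canon, List.filterMap_append, h0]
        simp only [hins]
        exact ih (A ++ [c]) hAnd

theorem nodup_dedup_foldl (l : List Char) :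
    ∀ A : List Char, A.Nodup →
    (l.foldl (fun acc x => if x ∈ acc then acc else acc ++ [x]) A).Nodup := by
  induction l with
  | nil => intro A hA; exact hA
  | cons x t ih =>
    intro A hA
    rw [List.foldl_cons]
    by_cases hx : x ∈ A
    · rw [if_pos hx]; exact ih A hA
    · rw [if_neg hx]
      exact ih (A ++ [x]) (nodup_concat _ _ hA hx)

-- ===== VERDICT (by name: the statement is the Claim_ definition above) =====
theorem ocorrencias1_spec : Claim_equal_ocorrencias1 := by
  unfold Claim_equal_ocorrencias1
  intro s1 s2 _
  unfold Spec_ocorrencias1 ocorrencias1 ocorrencias1_alt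
  simp only [PySem.List.foldl_append_singleton, List.nil_append]
  rw [outerA s2.toList _ _ (nodup_dedup_foldl s1.toList [] List.nodup_nil) (fun c _ => rfl)]
  rw [show (List.foldl (fun d c => PySem.Dict.modify d c 0 fun x => x + 1)
      (PySem.Dict.empty : PySem.Dict Char Int) s2.toList) = PySem.Dict.counter s2.toList from rfl]
  rw [show (PySem.Dict.empty : PySem.Dict Char Int)
      = PySem.Dict.mk (canon (fun c => List.count c s2.toList) []) from rfl]
  rw [foldB s2.toList s1.toList [] List.nodup_nil]
  simp [canon]
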